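-- pv_equiv track=rewrite | github.com/MDU-C2/Intelligent-Drone-Swarm | database/test_db_json_roundtrip.py | _sorted_rows
-- ===== SOURCE A (Python) =====
-- from typing import Any, Dict, List, Tuple
--
-- def _sorted_rows(rows: List[Dict[str, Any]], key_cols: List[str]) -> List[Dict[str, Any]]:
--     # Sort rows deterministically by key_cols (fallback to all columns if empty)
--     if not rows:
--         return rows
--     if not key_cols:
--         # assume first column is ID as in your schema
--         key_cols = [next(iter(rows[0].keys()))]
--
--     def sort_key(d):
--         return tuple(str(d.get(k)) for k in key_cols)
--
--     return sorted(rows, key=sort_key)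
-- ===== SOURCE B (Python) =====
-- from typing import Any, Dict, List, Tuple
--
-- def _sorted_rows(rows: List[Dict[str, Any]], key_cols: List[str]) -> List[Dict[str, Any]]:
--     # Bucket rows per key tuple (dict keeps first-insertion order, so ties keep
--     # their original order), then emit the buckets in sorted key order.
--     if not rows:
--         return rows
--     cols = key_cols if key_cols else [next(iter(rows[0]))]
--     groups = {}
--     for d in rows:
--         groups.setdefault(tuple(str(d.get(c)) for c in cols), []).append(d)
--     out = []
--     for k in sorted(groups):
--         out += groups[k]
--     return out
-- ===== Notes on version B (the rewrite author's own statement) =====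
-- stated objective: alternative
-- what changed: Replaces the single key-function sort of all rows by a dict grouping pass (bucket per key tuple, insertion order preserving ties) followed by sorting only the distinct keys and concatenating the buckets.
import Mathlib
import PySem

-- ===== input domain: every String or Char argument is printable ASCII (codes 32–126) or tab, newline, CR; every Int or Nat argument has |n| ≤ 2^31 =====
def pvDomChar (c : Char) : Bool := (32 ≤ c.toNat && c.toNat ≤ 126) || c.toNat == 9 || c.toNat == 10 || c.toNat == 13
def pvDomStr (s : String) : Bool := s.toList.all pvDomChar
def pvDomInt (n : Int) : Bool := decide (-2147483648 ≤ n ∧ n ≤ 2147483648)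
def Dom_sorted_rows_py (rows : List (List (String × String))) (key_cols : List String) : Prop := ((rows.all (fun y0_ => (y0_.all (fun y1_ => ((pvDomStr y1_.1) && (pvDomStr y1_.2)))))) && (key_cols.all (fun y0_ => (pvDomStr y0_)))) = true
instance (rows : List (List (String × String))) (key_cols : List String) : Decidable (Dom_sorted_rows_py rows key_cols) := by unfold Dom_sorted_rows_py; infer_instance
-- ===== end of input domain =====

-- One line: B groups rows into per-key-tuple buckets (a dict, insertion-ordered) and
-- concatenates the buckets in sorted key order, instead of A's single stable sort of
-- all rows under a tuple key function; 'alternative' objective, same results.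

-- ===== PORT A =====
-- str(d.get(k)): the dict value (a string on Dom) itself, or "None" when the key is absent.
def pvStrGet (d : List (String × String)) (k : String) : String :=
  match (PySem.Dict.ofList d).get? k with
  | some v => v
  | none => "None"

-- tuple(str(d.get(k)) for k in key_cols), as a List String (Python tuple lex order = List lex order)
def pvKey (key_cols : List String) (d : List (String × String)) : List String :=
  key_cols.map (pvStrGet d)

-- next(iter(rows[0].keys())); the [] case is where Python raises StopIteration (excluded by Pre_)
def pvFirstKey (r : List (String × String)) : String :=
  ((PySem.Dict.ofList r).keys).headD ""

def sorted_rows_py (rows : List (List (String × String))) (key_cols : List String) : List (List (String × String)) :=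
  match rows with
  | [] => rows
  | r :: _ =>
    let kc := if key_cols = [] then [pvFirstKey r] else key_cols
    PySem.List.sorted rows (fun d => pvKey kc d) false

-- ===== PORT B =====
def sorted_rows_py_alt (rows : List (List (String × String))) (key_cols : List String) : List (List (String × String)) :=
  match rows with
  | [] => rows
  | r :: _ =>
    let kc := if key_cols = [] then [pvFirstKey r] else key_cols
    -- groups.setdefault(key, []).append(d)
    let groups : PySem.Dict (List String) (List (List (String × String))) :=
      rows.foldl (fun g d => g.modify (pvKey kc d) [] (fun v => v ++ [d])) PySem.Dict.empty
    -- for key in sorted(groups): out.extend(groups[key])  (groups[key] always present: getD is exact here)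
    (PySem.List.sorted groups.keys (fun c => c) false).foldl (fun acc c => acc ++ groups.getD c []) []

-- ===== PRECONDITION & SPEC =====
-- Pre_ excludes only the inputs where A raises StopIteration (key_cols empty and the
-- first row an empty dict: next(iter({}.keys()))); B raises there too.
def Pre_sorted_rows_py (rows : List (List (String × String))) (key_cols : List String) : Prop :=
  key_cols = [] → rows.head? ≠ some []

instance (rows : List (List (String × String))) (key_cols : List String) : Decidable (Pre_sorted_rows_py rows key_cols) := by unfold Pre_sorted_rows_py; infer_instance

def pvWitness_sorted_rows_py : (List (List (String × String))) × List String :=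
  ([[("id", "2")], [("id", "1")]], [])

def Spec_sorted_rows_py (rows : List (List (String × String))) (key_cols : List String) (out : List (List (String × String))) : Prop := out = sorted_rows_py_alt rows key_cols
instance (rows : List (List (String × String))) (key_cols : List String) (out : List (List (String × String))) : Decidable (Spec_sorted_rows_py rows key_cols out) := by unfold Spec_sorted_rows_py; infer_instance

-- ===== CLAIM (what is proved, stated in full; the proofs are below) =====
def Claim_equal_sorted_rows_py : Prop := ∀ (rows : List (List (String × String))) (key_cols : List String), Dom_sorted_rows_py rows key_cols → Pre_sorted_rows_py rows key_cols → Spec_sorted_rows_py rows key_cols (sorted_rows_py rows key_cols)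

-- ===== LEMMAS AND PROOFS =====

theorem pv_insertBy_all_true {α : Type} (bf : α → α → Bool) (x : α) (l : List α)
    (h : ∀ y ∈ l, bf x y = true) : PySem.List.insertBy bf x l = x :: l := by
  cases l with
  | nil => simp [PySem.List.insertBy]
  | cons y t => simp [PySem.List.insertBy, h y (by simp)]

theorem pv_insertBy_append_false {α : Type} (bf : α → α → Bool) (x : α) (l1 l2 : List α)
    (h : ∀ y ∈ l1, bf x y = false) :
    PySem.List.insertBy bf x (l1 ++ l2) = l1 ++ PySem.List.insertBy bf x l2 := by
  induction l1 with
  | nil => simp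
  | cons y t ih =>
    simp [PySem.List.insertBy, h y (by simp)]
    exact ih (fun z hz => h z (by simp [hz]))

theorem pv_sorted_append {α κ : Type} [LT κ] [DecidableLT κ] (s : List α) (key : α → κ) (b : α) :
    PySem.List.sorted (s ++ [b]) key false
      = PySem.List.insertBy (fun x y => decide (key x < key y)) b (PySem.List.sorted s key false) := by
  rw [PySem.List.sorted_eq_foldl_insertBy, PySem.List.sorted_eq_foldl_insertBy, List.foldl_append]
  rfl

theorem pv_ins_flat_mem {α κ : Type} [LinearOrder κ] (key : α → κ) (a : α)
    (ks : List κ) (G : κ → List α)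
    (hs : ks.Pairwise (· < ·)) (hG : ∀ c ∈ ks, ∀ d ∈ G c, key d = c) (hm : key a ∈ ks) :
    PySem.List.insertBy (fun x y => decide (key x < key y)) a (ks.flatMap G)
      = ks.flatMap (fun c => G c ++ if key a = c then [a] else []) := by
  induction ks with
  | nil => simp at hm
  | cons k0 rest ih =>
    rw [List.pairwise_cons] at hs
    obtain ⟨hlt, hs'⟩ := hs
    have hG0 : ∀ d ∈ G k0, key d = k0 := hG k0 (by simp)
    rcases List.mem_cons.mp hm with h0 | hrest
    · have hfalse : ∀ y ∈ G k0, (decide (key a < key y) : Bool) = false := by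
        intro y hy
        simp [hG0 y hy, h0]
      have htrue : ∀ y ∈ rest.flatMap G, (decide (key a < key y) : Bool) = true := by
        intro y hy
        obtain ⟨c, hc, hyc⟩ := List.mem_flatMap.mp hy
        have hkey := hG c (by simp [hc]) y hyc
        simp [hkey, h0]
        exact hlt c hc
      rw [List.flatMap_cons, pv_insertBy_append_false _ _ _ _ hfalse,
          pv_insertBy_all_true _ _ _ htrue]
      have hcong : rest.flatMap (fun c => G c ++ if key a = c then [a] else []) = rest.flatMap G := by
        apply List.flatMap_congr
        intro c hc
        have : key a ≠ c := by rw [h0]; exact ne_of_lt (hlt c hc)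
        simp [this]
      rw [List.flatMap_cons, hcong]
      simp [h0]
    · have hk0a : k0 < key a := hlt _ hrest
      have hfalse : ∀ y ∈ G k0, (decide (key a < key y) : Bool) = false := by
        intro y hy
        simp [hG0 y hy]
        exact hk0a.le
      rw [List.flatMap_cons, pv_insertBy_append_false _ _ _ _ hfalse,
          ih hs' (fun c hc => hG c (by simp [hc])) hrest]
      have : key a ≠ k0 := ne_of_gt hk0a
      simp [List.flatMap_cons, this]

theorem pv_ins_flat_notmem {α κ : Type} [LinearOrder κ] (key : α → κ) (a : α)
    (ks : List κ) (G : κ → List α)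
    (hs : ks.Pairwise (· < ·)) (hG : ∀ c ∈ ks, ∀ d ∈ G c, key d = c) (hm : key a ∉ ks)
    (hGa : G (key a) = []) :
    PySem.List.insertBy (fun x y => decide (key x < key y)) a (ks.flatMap G)
      = (PySem.List.insertBy (fun x y => decide (x < y)) (key a) ks).flatMap
          (fun c => G c ++ if key a = c then [a] else []) := by
  induction ks with
  | nil => simp [PySem.List.insertBy, hGa]
  | cons k0 rest ih =>
    rw [List.pairwise_cons] at hs
    obtain ⟨hlt, hs'⟩ := hs
    have hG0 : ∀ d ∈ G k0, key d = k0 := hG k0 (by simp)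
    have hne : key a ≠ k0 := by intro h; exact hm (by simp [h])
    rcases lt_or_gt_of_ne hne with hlt0 | hgt0
    · have htrue : ∀ y ∈ (k0 :: rest).flatMap G, (decide (key a < key y) : Bool) = true := by
        intro y hy
        obtain ⟨c, hc, hyc⟩ := List.mem_flatMap.mp hy
        have hkey := hG c hc y hyc
        have hk0c : k0 ≤ c := by
          rcases List.mem_cons.mp hc with rfl | h
          · exact le_refl _
          · exact (hlt c h).le
        simp [hkey]
        exact lt_of_lt_of_le hlt0 hk0c
      rw [pv_insertBy_all_true _ _ _ htrue]
      have hins : PySem.List.insertBy (fun x y => decide (x < y)) (key a) (k0 :: rest) = key a :: k0 :: rest := by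
        simp [PySem.List.insertBy, hlt0]
      rw [hins]
      have hcong : (k0 :: rest).flatMap (fun c => G c ++ if key a = c then [a] else []) = (k0 :: rest).flatMap G := by
        apply List.flatMap_congr
        intro c hc
        have : key a ≠ c := by
          rcases List.mem_cons.mp hc with rfl | h
          · exact hne
          · exact ne_of_lt (lt_trans hlt0 (hlt c h))
        simp [this]
      rw [List.flatMap_cons (x := key a)]
      rw [hcong]
      simp [hGa]
    · have hfalse : ∀ y ∈ G k0, (decide (key a < key y) : Bool) = false := by
        intro y hy
        simp [hG0 y hy]
        exact hgt0.le
      have hm' : key a ∉ rest := fun h => hm (List.mem_cons_of_mem _ h)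
      rw [List.flatMap_cons, pv_insertBy_append_false _ _ _ _ hfalse,
          ih hs' (fun c hc => hG c (by simp [hc])) hm']
      have hins : PySem.List.insertBy (fun x y => decide (x < y)) (key a) (k0 :: rest)
          = k0 :: PySem.List.insertBy (fun x y => decide (x < y)) (key a) rest := by
        simp [PySem.List.insertBy, not_lt.mpr hgt0.le]
      rw [hins, List.flatMap_cons]
      simp [hne]

-- two LT/DecidableLT instance pairs deciding the same order sort identically
theorem pv_sorted_ext {α κ : Type} [i1 : LT κ] [d1 : @DecidableLT κ i1] [i2 : LT κ] [d2 : @DecidableLT κ i2]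
    (h : ∀ a b : κ, @LT.lt κ i1 a b ↔ @LT.lt κ i2 a b) (xs : List α) (key : α → κ) :
    @PySem.List.sorted α κ i1 d1 xs key false = @PySem.List.sorted α κ i2 d2 xs key false := by
  rw [@PySem.List.sorted_eq_foldl_insertBy α κ i1 d1 xs key,
      @PySem.List.sorted_eq_foldl_insertBy α κ i2 d2 xs key]
  congr 1
  funext acc x
  congr 1
  funext a b
  exact decide_eq_decide.mpr (h (key a) (key b))

-- Mathlib's LinearOrder instances on List String and the core lex instances sort identically
theorem pv_sorted_bridge {β : Type} (ys : List β) (key : β → List String) :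
    @PySem.List.sorted β (List String) instDistribLatticeOfLinearOrder.toSemilatticeInf.toLT LinearOrder.toDecidableLT ys key false
      = @PySem.List.sorted β (List String) List.instLT (fun a b => a.decidableLT b) ys key false :=
  pv_sorted_ext (i1 := instDistribLatticeOfLinearOrder.toSemilatticeInf.toLT)
    (d1 := LinearOrder.toDecidableLT) (i2 := List.instLT) (d2 := fun a b => a.decidableLT b)
    (fun a b => (List.lt_iff_lex_lt a b).symm) ys key

theorem pv_filter_map_snd {α κ : Type} [BEq κ] (key : α → κ) (l : List α) (c : κ) :
    List.map (fun x => x.2) (List.filter (fun p => p.1 == c) (l.map (fun d => (key d, d))))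
      = l.filter (fun d => key d == c) := by
  induction l with
  | nil => rfl
  | cons x t ih =>
    by_cases h : key x == c <;> simp [h, ih]

-- stable sort by key = concatenation, over the sorted distinct keys, of the per-key filters
theorem pv_sorted_eq_groups {α κ : Type} [LinearOrder κ] [BEq κ] [LawfulBEq κ]
    (xs : List α) (key : α → κ) :
    PySem.List.sorted xs key false
      = (PySem.List.sorted (PySem.Set.ofList (xs.map key)) (fun c => c) false).flatMap
          (fun c => xs.filter (fun d => key d == c)) := by
  induction xs using List.reverseRecOn with
  | nil => rfl
  | append_singleton xs a ih =>
    rw [pv_sorted_append, ih]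
    have hs : (PySem.List.sorted (PySem.Set.ofList (xs.map key)) (fun c => c) false).Pairwise (· < ·) :=
      PySem.List.sorted_ofList_pairwise_lt _
    have hG : ∀ c ∈ PySem.List.sorted (PySem.Set.ofList (xs.map key)) (fun c => c) false,
        ∀ d ∈ xs.filter (fun d => key d == c), key d = c := by
      intro c _ d hd
      have := (List.mem_filter.mp hd).2
      simpa using this
    have hset : PySem.Set.ofList ((xs ++ [a]).map key) = PySem.Set.add (PySem.Set.ofList (xs.map key)) (key a) := by
      rw [PySem.Set.ofList_eq_foldl, List.map_append, List.foldl_append,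
          ← PySem.Set.ofList_eq_foldl]
      rfl
    have hfilter : ∀ c, (xs ++ [a]).filter (fun d => key d == c)
        = xs.filter (fun d => key d == c) ++ if key a = c then [a] else [] := by
      intro c
      rw [List.filter_append]
      congr 1
      by_cases h : key a = c <;> simp [h]
    by_cases hmem : key a ∈ PySem.Set.ofList (xs.map key)
    · have hadd : PySem.Set.add (PySem.Set.ofList (xs.map key)) (key a) = PySem.Set.ofList (xs.map key) := by
        simp [PySem.Set.add, PySem.Set.contains, hmem]
      rw [hset, hadd]
      have hm' : key a ∈ PySem.List.sorted (PySem.Set.ofList (xs.map key)) (fun c => c) false := by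
        rw [PySem.List.mem_sorted]
        exact hmem
      rw [pv_ins_flat_mem key a _ _ hs hG hm']
      apply List.flatMap_congr
      intro c hc
      rw [hfilter c]
    · have hadd : PySem.Set.add (PySem.Set.ofList (xs.map key)) (key a) = PySem.Set.ofList (xs.map key) ++ [key a] := by
        simp [PySem.Set.add, PySem.Set.contains, hmem]
      have hm' : key a ∉ PySem.List.sorted (PySem.Set.ofList (xs.map key)) (fun c => c) false := by
        rw [PySem.List.mem_sorted]
        exact hmem
      have hGa : xs.filter (fun d => key d == key a) = [] := by
        rw [List.filter_eq_nil_iff]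
        intro d hd
        simp only [beq_iff_eq]
        intro h
        exact hmem ((PySem.Set.mem_ofList _ _).mpr (List.mem_map.mpr ⟨d, hd, h⟩))
      rw [hset, hadd, pv_sorted_append,
          pv_ins_flat_notmem key a _ _ hs hG hm' hGa]
      apply List.flatMap_congr
      intro c hc
      rw [hfilter c]

-- ===== VERDICT (by name: the statement is the Claim_ definition above) =====
theorem sorted_rows_py_spec : Claim_equal_sorted_rows_py := by
  intro rows key_cols _ _
  unfold Spec_sorted_rows_py
  cases rows with
  | nil => rfl
  | cons r rs =>
    simp only [sorted_rows_py, sorted_rows_py_alt]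
    rw [PySem.List.foldl_append_eq_flatMap]
    have hkeys : (List.foldl (fun g d => g.modify (pvKey (if key_cols = [] then [pvFirstKey r] else key_cols) d) [] (fun v => v ++ [d])) PySem.Dict.empty (r :: rs)).keys
        = PySem.Set.ofList ((r :: rs).map (pvKey (if key_cols = [] then [pvFirstKey r] else key_cols))) := by
      rw [PySem.Dict.keys_foldl_modify_key (r :: rs) (pvKey (if key_cols = [] then [pvFirstKey r] else key_cols)) [] (fun g d => fun v => v ++ [d]) PySem.Dict.empty]
      rw [PySem.Dict.keys_empty, PySem.Set.ofList_eq_foldl]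
      rfl
    have hget : ∀ c, (List.foldl (fun g d => g.modify (pvKey (if key_cols = [] then [pvFirstKey r] else key_cols) d) [] (fun v => v ++ [d])) PySem.Dict.empty (r :: rs)).getD c []
        = (r :: rs).filter (fun d => pvKey (if key_cols = [] then [pvFirstKey r] else key_cols) d == c) := by
      intro c
      have hfold : List.foldl (fun g p => PySem.Dict.modify g p.1 [] (fun v => v ++ [p.2])) PySem.Dict.empty ((r :: rs).map (fun d => (pvKey (if key_cols = [] then [pvFirstKey r] else key_cols) d, d)))
          = List.foldl (fun g d => PySem.Dict.modify g (pvKey (if key_cols = [] then [pvFirstKey r] else key_cols) d) [] (fun v => v ++ [d])) PySem.Dict.empty (r :: rs) := by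
        rw [List.foldl_map]
      rw [← hfold, PySem.Dict.getD_foldl_modify_append, pv_filter_map_snd]
      simp [pysem]
    simp only [hkeys, hget, List.nil_append]
    have hg := pv_sorted_eq_groups (r :: rs) (pvKey (if key_cols = [] then [pvFirstKey r] else key_cols))
    rw [pv_sorted_bridge, pv_sorted_bridge] at hg
    exact hg
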